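-- pv_equiv track=rewrite | github.com/ampl/ampls-api | python/examples/tsp_helpers.py | find_min_cut
-- ===== SOURCE A (Python) =====
-- def get_adj(graph):
--     adj = {}
--     for (i, j), cap in graph.items():
--         if cap == 0:
--             continue
--         if i in adj:
--             adj[i].append(j)
--         else:
--             adj[i] = [j]
--     return adj
--
-- def bfs(graph, s, t):
--     adj = get_adj(graph)
--     Q = [s]
--     pred = {}
--     visited = set()
--     marked = set([s])
--     while Q != []:
--         u = Q.pop()
--         visited.add(u)
--         if u == t:
--             break
--         if u not in adj:
--             continue
--         for v in adj[u]:
--             if v not in visited and v not in marked: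
--                 pred[v] = u
--                 Q.append(v)
--                 marked.add(v)
--     return visited, pred
--
-- def find_min_cut(graph, s, t):
--     visited, pred = bfs(graph, s, t)
--     assert t not in visited
--     return [
--         (u, v)
--         for (u, v) in graph
--         if u in visited and v not in visited
--     ]
-- ===== SOURCE B (Python) =====
-- def reachable(graph, s):
--     visited = {s}
--     while True:
--         new = {v for (u, v), cap in graph.items()
--                if cap != 0 and u in visited and v not in visited}
--         if not new:
--             break
--         visited |= new
--     return visited
--
--
-- def find_min_cut(graph, s, t):
--     visited = reachable(graph, s)
--     assert t not in visited
--     return [(u, v) for (u, v) in graph if u in visited and v not in visited]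
-- ===== Notes on version B (the rewrite author's own statement) =====
-- stated objective: alternative
-- what changed: Replaces A's explicit DFS worklist (stack Q with separate visited/marked sets and an unused pred dict) by whole-set fixpoint saturation: repeatedly add every node one positive-capacity edge away from the current visited set until a round adds nothing, then emit the same cut-edge comprehension.
import Mathlib
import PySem

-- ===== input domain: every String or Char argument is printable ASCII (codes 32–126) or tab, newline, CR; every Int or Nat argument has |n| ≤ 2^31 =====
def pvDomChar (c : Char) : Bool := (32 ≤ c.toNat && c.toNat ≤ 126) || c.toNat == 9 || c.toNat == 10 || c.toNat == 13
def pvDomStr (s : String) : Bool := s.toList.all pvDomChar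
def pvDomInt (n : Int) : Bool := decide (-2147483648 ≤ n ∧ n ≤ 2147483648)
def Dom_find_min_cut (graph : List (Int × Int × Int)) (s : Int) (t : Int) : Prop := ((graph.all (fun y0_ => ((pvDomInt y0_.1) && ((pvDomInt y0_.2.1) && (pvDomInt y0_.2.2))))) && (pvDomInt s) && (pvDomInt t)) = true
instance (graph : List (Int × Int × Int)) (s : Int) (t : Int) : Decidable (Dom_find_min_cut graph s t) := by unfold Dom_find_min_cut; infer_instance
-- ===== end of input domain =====

-- B replaces A's explicit DFS worklist (stack Q, visited/marked sets, unused pred dict) by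
-- whole-set fixpoint saturation rounds until no new node is reachable (objective: alternative).

-- ===== PORT A =====
-- The Python argument is the dict {(i,j): cap}; both Pythons receive the same dict, built here
-- from the association list (insert overwrites in place, so last value wins — Python-exact).
def toDict (graph : List (Int × Int × Int)) : PySem.Dict (Int × Int) Int :=
  graph.foldl (fun d e => d.insert (e.1, e.2.1) e.2.2) PySem.Dict.empty

def get_adj (d : PySem.Dict (Int × Int) Int) : PySem.Dict Int (List Int) :=
  d.items.foldl (fun (adj : PySem.Dict Int (List Int)) (e : (Int × Int) × Int) =>
    if e.2 == 0 then adj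
    else
      match adj.get? e.1.1 with
      | some l => adj.insert e.1.1 (l ++ [e.1.2])
      | none   => adj.insert e.1.1 [e.1.2]) PySem.Dict.empty

-- A's while loop, with fuel; 2*size+2 units always suffice (each node is pushed at most once),
-- proved below, so the fuel-exhaustion branch is never taken on any input.
def bfsLoop (adj : PySem.Dict Int (List Int)) (t : Int) :
    Nat → List Int → PySem.Set Int → PySem.Dict Int Int → PySem.Set Int →
    PySem.Set Int × PySem.Dict Int Int
  | 0, _, visited, pred, _ => (visited, pred)
  | fuel+1, Q, visited, pred, marked =>
    match Q.getLast? with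
    | none => (visited, pred)                       -- while Q != [] exits
    | some u =>                                     -- u = Q.pop()
      let Q1 := Q.dropLast
      let visited1 := PySem.Set.add visited u       -- visited.add(u)
      if u == t then (visited1, pred)               -- break
      else
        match adj.get? u with
        | none => bfsLoop adj t fuel Q1 visited1 pred marked   -- u not in adj: continue
        | some ns =>
          let st := ns.foldl (fun (acc : List Int × PySem.Dict Int Int × PySem.Set Int) v =>
            if !PySem.Set.contains visited1 v && !PySem.Set.contains acc.2.2 v then
              (acc.1 ++ [v], acc.2.1.insert v u, PySem.Set.add acc.2.2 v)
            else acc) (Q1, pred, marked)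
          bfsLoop adj t fuel st.1 visited1 st.2.1 st.2.2

def bfs (d : PySem.Dict (Int × Int) Int) (s t : Int) :
    PySem.Set Int × PySem.Dict Int Int :=
  bfsLoop (get_adj d) t (2 * d.size + 2) [s] PySem.Set.empty PySem.Dict.empty
    (PySem.Set.ofList [s])

-- 'assert t not in visited' raises exactly outside Pre_find_min_cut; there A has no value.
def find_min_cut (graph : List (Int × Int × Int)) (s : Int) (t : Int) : List (Int × Int) :=
  let d := toDict graph
  let visited := (bfs d s t).1
  d.keys.filter (fun p => PySem.Set.contains visited p.1 && !PySem.Set.contains visited p.2)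

-- ===== PORT B =====
-- Source B's 'while True' saturation loop, with fuel; size+1 rounds always suffice (each round
-- before the exhausted one adds at least one node), proved below.
def growLoop (d : PySem.Dict (Int × Int) Int) : Nat → PySem.Set Int → PySem.Set Int
  | 0, visited => visited
  | fuel+1, visited =>
    let nw : PySem.Set Int := PySem.Set.ofList
      ((d.items.filter (fun e =>
          e.2 != 0 && PySem.Set.contains visited e.1.1 && !PySem.Set.contains visited e.1.2)).map
        (fun e => e.1.2))
    if nw = [] then visited else growLoop d fuel (PySem.Set.union visited nw)

-- Source B's helper reachable(graph, s)
def reach_set (d : PySem.Dict (Int × Int) Int) (s : Int) : PySem.Set Int :=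
  growLoop d (d.size + 1) (PySem.Set.ofList [s])

def find_min_cut_alt (graph : List (Int × Int × Int)) (s : Int) (t : Int) : List (Int × Int) :=
  let d := toDict graph
  let visited := reach_set d s
  d.keys.filter (fun p => PySem.Set.contains visited p.1 && !PySem.Set.contains visited p.2)

-- ===== PRECONDITION & SPEC =====
-- Specification-level transitive closure of the positive-capacity edge relation, used only to
-- state Pre_: one saturation pass over the edge list, iterated |edges|+1 times (a plain fold,
-- independent of either port's loop).
def cutReachStep (E : List ((Int × Int) × Int)) (vis : List Int) : List Int :=
  E.foldl (fun vis e =>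
    if e.2 ≠ 0 ∧ e.1.1 ∈ vis ∧ e.1.2 ∉ vis then vis ++ [e.1.2] else vis) vis

def cutReach (graph : List (Int × Int × Int)) (s : Int) : List Int :=
  (List.range ((toDict graph).items.length + 1)).foldl
    (fun vis _ => cutReachStep (toDict graph).items vis) [s]

-- A's 'assert t not in visited' (and B's identical assert) raises AssertionError exactly when t
-- is reachable from s along positive-capacity edges; Pre_ admits exactly the inputs where A
-- returns normally.
def Pre_find_min_cut (graph : List (Int × Int × Int)) (s : Int) (t : Int) : Prop :=
  t ∉ cutReach graph s
instance (graph : List (Int × Int × Int)) (s : Int) (t : Int) : Decidable (Pre_find_min_cut graph s t) := by unfold Pre_find_min_cut; infer_instance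

def pvWitness_find_min_cut : (List (Int × Int × Int)) × Int × Int := ([(0, 1, 0), (1, 2, 3)], 0, 1)

def Spec_find_min_cut (graph : List (Int × Int × Int)) (s : Int) (t : Int) (out : List (Int × Int)) : Prop := out = find_min_cut_alt graph s t
instance (graph : List (Int × Int × Int)) (s : Int) (t : Int) (out : List (Int × Int)) : Decidable (Spec_find_min_cut graph s t out) := by unfold Spec_find_min_cut; infer_instance

-- ===== CLAIM (what is proved, stated in full; the proofs are below) =====
def Claim_equal_find_min_cut : Prop := ∀ (graph : List (Int × Int × Int)) (s : Int) (t : Int), Dom_find_min_cut graph s t → Pre_find_min_cut graph s t → Spec_find_min_cut graph s t (find_min_cut graph s t)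

-- ===== LEMMAS AND PROOFS =====

-- There is a positive-capacity edge u → v in the dict's entries.
def EdgeP (E : List ((Int × Int) × Int)) (u v : Int) : Prop := ∃ c, ((u, v), c) ∈ E ∧ c ≠ 0

-- v is reachable from s along positive-capacity edges.
inductive Reach (E : List ((Int × Int) × Int)) (s : Int) : Int → Prop
  | base : Reach E s s
  | step {u v : Int} : Reach E s u → EdgeP E u v → Reach E s v

theorem cutReachStep_prefix (E : List ((Int × Int) × Int)) :
    ∀ vis : List Int, ∃ ext, cutReachStep E vis = vis ++ ext := by
  induction E with
  | nil => intro vis; exact ⟨[], by simp [cutReachStep]⟩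
  | cons e E ih =>
    intro vis
    rw [cutReachStep, List.foldl_cons]
    split
    · obtain ⟨ext, hext⟩ := ih (vis ++ [e.1.2])
      exact ⟨[e.1.2] ++ ext, by rw [← List.append_assoc]; exact hext⟩
    · exact ih vis

theorem cutReachStep_subset (E : List ((Int × Int) × Int)) (vis : List Int) :
    vis ⊆ cutReachStep E vis := by
  obtain ⟨ext, hext⟩ := cutReachStep_prefix E vis
  rw [hext]; exact List.subset_append_left _ _

theorem cutReachStep_nodup (E : List ((Int × Int) × Int)) :
    ∀ vis : List Int, vis.Nodup → (cutReachStep E vis).Nodup := by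
  induction E with
  | nil => intro vis h; simpa [cutReachStep] using h
  | cons e E ih =>
    intro vis h
    rw [cutReachStep, List.foldl_cons]
    split
    · rename_i hc
      refine ih _ ?_
      simp [List.nodup_append, h]
      intro a ha hae
      exact hc.2.2 (hae ▸ ha)
    · exact ih vis h

theorem cutReachStep_mem (E : List ((Int × Int) × Int)) :
    ∀ vis : List Int, ∀ x ∈ cutReachStep E vis, x ∈ vis ∨ x ∈ E.map (fun e => e.1.2) := by
  induction E with
  | nil => intro vis x hx; exact Or.inl (by simpa [cutReachStep] using hx)
  | cons e E ih =>
    intro vis x hx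
    rw [cutReachStep, List.foldl_cons] at hx
    simp only [List.map_cons, List.mem_cons]
    split at hx
    · rcases ih _ x hx with h | h
      · rcases List.mem_append.mp h with h' | h'
        · exact Or.inl h'
        · simp only [List.mem_singleton] at h'
          exact Or.inr (Or.inl h')
      · exact Or.inr (Or.inr h)
    · rcases ih _ x hx with h | h
      · exact Or.inl h
      · exact Or.inr (Or.inr h)

theorem cutReachStep_edge (E : List ((Int × Int) × Int)) :
    ∀ (vis : List Int) (e : (Int × Int) × Int), e ∈ E → e.2 ≠ 0 → e.1.1 ∈ vis →
      e.1.2 ∈ cutReachStep E vis := by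
  induction E with
  | nil => intro vis e he; exact absurd he List.not_mem_nil
  | cons e' E ih =>
    intro vis e he hc hu
    rw [cutReachStep, List.foldl_cons]
    rcases List.mem_cons.mp he with rfl | he'
    · by_cases hcond : e.2 ≠ 0 ∧ e.1.1 ∈ vis ∧ e.1.2 ∉ vis
      · rw [if_pos hcond]
        exact cutReachStep_subset E _ (List.mem_append.mpr (Or.inr (List.mem_singleton.mpr rfl)))
      · rw [if_neg hcond]
        have hv : e.1.2 ∈ vis := by
          by_contra hv
          exact hcond ⟨hc, hu, hv⟩
        exact cutReachStep_subset E _ hv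
    · by_cases hcond : e'.2 ≠ 0 ∧ e'.1.1 ∈ vis ∧ e'.1.2 ∉ vis
      · rw [if_pos hcond]
        exact ih _ e he' hc (List.mem_append.mpr (Or.inl hu))
      · rw [if_neg hcond]
        exact ih _ e he' hc hu

theorem iterate_fixed {f : List Int → List Int} {vis : List Int} (h : f vis = vis) :
    ∀ n, f^[n] vis = vis := by
  intro n
  induction n with
  | zero => rfl
  | succ n ihn => rw [Function.iterate_succ_apply, h, ihn]

theorem subset_iterate (E : List ((Int × Int) × Int)) :
    ∀ (n : Nat) (vis : List Int), vis ⊆ (cutReachStep E)^[n] vis := by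
  intro n
  induction n with
  | zero => intro vis; exact fun x hx => hx
  | succ n ihn =>
    intro vis
    rw [Function.iterate_succ_apply]
    exact fun x hx => ihn _ (cutReachStep_subset E vis hx)

theorem fix_of_fuel (E : List ((Int × Int) × Int)) (s : Int) :
    ∀ (n : Nat) (vis : List Int), vis.Nodup →
      (∀ x ∈ vis, x ∈ s :: E.map (fun e => e.1.2)) →
      E.length + 2 ≤ n + vis.length →
      cutReachStep E ((cutReachStep E)^[n] vis) = (cutReachStep E)^[n] vis := by
  intro n
  induction n with
  | zero =>
    intro vis hnd hsub harith
    exfalso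
    have hle : vis.length ≤ (s :: E.map (fun e => e.1.2)).length :=
      (List.Nodup.subperm hnd (fun x hx => hsub x hx)).length_le
    simp only [List.length_cons, List.length_map] at hle
    omega
  | succ n ihn =>
    intro vis hnd hsub harith
    by_cases hfix : cutReachStep E vis = vis
    · rw [iterate_fixed hfix, hfix]
    · rw [Function.iterate_succ_apply]
      obtain ⟨ext, hext⟩ := cutReachStep_prefix E vis
      have hextne : ext ≠ [] := by
        intro h; rw [h, List.append_nil] at hext; exact hfix hext
      refine ihn (cutReachStep E vis) (cutReachStep_nodup E vis hnd) ?_ ?_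
      · intro x hx
        rcases cutReachStep_mem E vis x hx with h | h
        · exact hsub x h
        · exact List.mem_cons_of_mem _ h
      · have : 1 ≤ ext.length := List.length_pos_iff.mpr hextne
        have : (cutReachStep E vis).length = vis.length + ext.length := by
          rw [hext]; simp
        omega

theorem foldl_range_iterate (f : List Int → List Int) :
    ∀ (n : Nat) (init : List Int),
      (List.range n).foldl (fun v _ => f v) init = f^[n] init := by
  intro n
  induction n with
  | zero => intro init; rfl
  | succ n ihn =>
    intro init
    rw [List.range_succ, List.foldl_append, ihn, Function.iterate_succ_apply']
    rfl

theorem cutReach_complete (graph : List (Int × Int × Int)) (s x : Int)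
    (hr : Reach (toDict graph).items s x) : x ∈ cutReach graph s := by
  have hfold : cutReach graph s
      = (cutReachStep (toDict graph).items)^[(toDict graph).items.length + 1] [s] :=
    foldl_range_iterate _ _ _
  have hfix := fix_of_fuel (toDict graph).items s ((toDict graph).items.length + 1) [s]
    (by simp) (by intro y hy; simp only [List.mem_singleton] at hy; simp [hy]) (by simp)
  rw [hfold]
  induction hr with
  | base => exact subset_iterate _ _ [s] (by simp)
  | step h he ihh =>
    obtain ⟨c, hcmem, hc⟩ := he
    have hstep := cutReachStep_edge (toDict graph).items
      ((cutReachStep (toDict graph).items)^[(toDict graph).items.length + 1] [s])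
      _ hcmem hc ihh
    rw [hfix] at hstep
    exact hstep

theorem set_contains_iff (s : PySem.Set Int) (x : Int) :
    PySem.Set.contains s x = true ↔ x ∈ s := by
  simp [PySem.Set.contains]

theorem adj_fold (u : Int) (l : List ((Int × Int) × Int)) :
    ∀ (acc : PySem.Dict Int (List Int)),
      (((l.foldl (fun (adj : PySem.Dict Int (List Int)) (e : (Int × Int) × Int) =>
          if e.2 == 0 then adj
          else
            match adj.get? e.1.1 with
            | some ll => adj.insert e.1.1 (ll ++ [e.1.2])
            | none   => adj.insert e.1.1 [e.1.2]) acc).get? u).getD [])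
      = ((acc.get? u).getD []) ++ (l.filter (fun e => e.2 != 0 && e.1.1 == u)).map (fun e => e.1.2) := by
  induction l with
  | nil => intro acc; simp
  | cons e l ih =>
    intro acc
    rw [List.foldl_cons, List.filter_cons]
    by_cases he : e.2 = 0
    · rw [if_pos (by simp [he])]
      have hf : (e.2 != 0 && e.1.1 == u) = false := by simp [he]
      rw [hf, ih]
      simp
    · rw [if_neg (by simp [he])]
      have hf : (e.2 != 0 && e.1.1 == u) = (e.1.1 == u) := by simp [he]
      rw [hf]
      cases hg : acc.get? e.1.1 with
      | none =>
        simp only []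
        by_cases hu : e.1.1 = u
        · subst hu
          rw [ih, PySem.Dict.get?_insert_self, hg]
          simp
        · rw [ih, PySem.Dict.get?_insert_of_ne _ _ (Ne.symm hu)]
          simp [hu]
      | some ll =>
        simp only []
        by_cases hu : e.1.1 = u
        · subst hu
          rw [ih, PySem.Dict.get?_insert_self, hg]
          simp
        · rw [ih, PySem.Dict.get?_insert_of_ne _ _ (Ne.symm hu)]
          simp [hu]


theorem adj_mem (d : PySem.Dict (Int × Int) Int) (u v : Int) :
    v ∈ (((get_adj d).get? u).getD []) ↔ EdgeP d.items u v := by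
  unfold get_adj
  rw [adj_fold]
  simp only [PySem.Dict.get?_empty, Option.getD_none, List.nil_append, List.mem_map,
    List.mem_filter, EdgeP]
  constructor
  · rintro ⟨e, ⟨hmem, hcond⟩, hv⟩
    simp only [Bool.and_eq_true, bne_iff_ne, beq_iff_eq] at hcond
    refine ⟨e.2, ?_, hcond.1⟩
    have : e = ((u, v), e.2) := by
      obtain ⟨⟨a, b⟩, c⟩ := e
      simp_all
    rwa [← this]
  · rintro ⟨c, hmem, hc⟩
    exact ⟨((u, v), c), ⟨hmem, by simp [hc]⟩, rfl⟩


theorem push_fold (u : Int) (vis1 : PySem.Set Int) :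
    ∀ (ns : List Int) (q : List Int) (p : PySem.Dict Int Int) (m : PySem.Set Int),
      (∀ x ∈ vis1, x ∈ m) → m.Nodup →
      ((∀ x, x ∈ (ns.foldl (fun (acc : List Int × PySem.Dict Int Int × PySem.Set Int) v =>
            if !PySem.Set.contains vis1 v && !PySem.Set.contains acc.2.2 v then
              (acc.1 ++ [v], acc.2.1.insert v u, PySem.Set.add acc.2.2 v)
            else acc) (q, p, m)).2.2 ↔ x ∈ m ∨ x ∈ ns) ∧
       (∀ x, x ∈ (ns.foldl (fun (acc : List Int × PySem.Dict Int Int × PySem.Set Int) v =>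
            if !PySem.Set.contains vis1 v && !PySem.Set.contains acc.2.2 v then
              (acc.1 ++ [v], acc.2.1.insert v u, PySem.Set.add acc.2.2 v)
            else acc) (q, p, m)).1 → x ∈ q ∨ x ∈ ns) ∧
       (∀ x ∈ q, x ∈ (ns.foldl (fun (acc : List Int × PySem.Dict Int Int × PySem.Set Int) v =>
            if !PySem.Set.contains vis1 v && !PySem.Set.contains acc.2.2 v then
              (acc.1 ++ [v], acc.2.1.insert v u, PySem.Set.add acc.2.2 v)
            else acc) (q, p, m)).1) ∧
       (∀ x ∈ ns, x ∉ vis1 → x ∉ m →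
          x ∈ (ns.foldl (fun (acc : List Int × PySem.Dict Int Int × PySem.Set Int) v =>
            if !PySem.Set.contains vis1 v && !PySem.Set.contains acc.2.2 v then
              (acc.1 ++ [v], acc.2.1.insert v u, PySem.Set.add acc.2.2 v)
            else acc) (q, p, m)).1) ∧
       ((ns.foldl (fun (acc : List Int × PySem.Dict Int Int × PySem.Set Int) v =>
            if !PySem.Set.contains vis1 v && !PySem.Set.contains acc.2.2 v then
              (acc.1 ++ [v], acc.2.1.insert v u, PySem.Set.add acc.2.2 v)
            else acc) (q, p, m)).2.2.Nodup ∧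
        (ns.foldl (fun (acc : List Int × PySem.Dict Int Int × PySem.Set Int) v =>
            if !PySem.Set.contains vis1 v && !PySem.Set.contains acc.2.2 v then
              (acc.1 ++ [v], acc.2.1.insert v u, PySem.Set.add acc.2.2 v)
            else acc) (q, p, m)).1.length + m.length
          = q.length + (ns.foldl (fun (acc : List Int × PySem.Dict Int Int × PySem.Set Int) v =>
            if !PySem.Set.contains vis1 v && !PySem.Set.contains acc.2.2 v then
              (acc.1 ++ [v], acc.2.1.insert v u, PySem.Set.add acc.2.2 v)
            else acc) (q, p, m)).2.2.length ∧
        q.length ≤ (ns.foldl (fun (acc : List Int × PySem.Dict Int Int × PySem.Set Int) v =>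
            if !PySem.Set.contains vis1 v && !PySem.Set.contains acc.2.2 v then
              (acc.1 ++ [v], acc.2.1.insert v u, PySem.Set.add acc.2.2 v)
            else acc) (q, p, m)).1.length)) := by
  intro ns
  induction ns with
  | nil =>
    intro q p m hsub hnd
    simp [hnd]
  | cons v ns ih =>
    intro q p m hsub hnd
    rw [List.foldl_cons]
    by_cases hc : v ∉ vis1 ∧ v ∉ m
    · have hcond : (!PySem.Set.contains vis1 v && !PySem.Set.contains m v) = true := by
        simp [PySem.Set.contains, hc.1, hc.2]
      simp only [hcond, if_true]
      have hmadd : (PySem.Set.add m v : List Int) = m ++ [v] := by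
        simp [PySem.Set.add, PySem.Set.contains, hc.2]
      have hsub' : ∀ x ∈ vis1, x ∈ PySem.Set.add m v := by
        intro x hx; rw [PySem.Set.mem_add]; exact Or.inl (hsub x hx)
      have hnd' : (PySem.Set.add m v).Nodup := PySem.Set.nodup_add m v hnd
      obtain ⟨h1, h2, h3, h4, h5, h6, h7⟩ := ih (q ++ [v]) (p.insert v u) (PySem.Set.add m v) hsub' hnd'
      refine ⟨?_, ?_, ?_, ?_, h5, ?_, by simp only [List.length_append, List.length_cons, List.length_nil] at h7; omega⟩
      · intro x
        rw [h1, PySem.Set.mem_add]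
        simp only [List.mem_cons]
        tauto
      · intro x hx
        rcases h2 x hx with h | h
        · rcases List.mem_append.mp h with h | h
          · exact Or.inl h
          · simp only [List.mem_singleton] at h; exact Or.inr (by simp [h])
        · exact Or.inr (List.mem_cons_of_mem _ h)
      · intro x hx
        exact h3 x (List.mem_append.mpr (Or.inl hx))
      · intro x hx hxv hxm
        rcases List.mem_cons.mp hx with rfl | hx'
        · exact h3 x (List.mem_append.mpr (Or.inr (List.mem_singleton.mpr rfl)))
        · by_cases hxm' : x ∈ PySem.Set.add m v
          · rw [PySem.Set.mem_add] at hxm'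
            rcases hxm' with h | rfl
            · exact absurd h hxm
            · exact h3 x (List.mem_append.mpr (Or.inr (List.mem_singleton.mpr rfl)))
          · exact h4 x hx' hxv hxm'
      · have hlen : (PySem.Set.add m v : List Int).length = m.length + 1 := by
          rw [hmadd]; simp
        have hq : (q ++ [v]).length = q.length + 1 := by simp
        omega
    · have hcond : (!PySem.Set.contains vis1 v && !PySem.Set.contains m v) = false := by
        rcases not_and_or.mp hc with h | h
        · simp only [not_not] at h
          simp [PySem.Set.contains, h]
        · simp only [not_not] at h
          simp [PySem.Set.contains, h]
      have hvm : v ∈ m := by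
        rcases not_and_or.mp hc with h | h
        · exact hsub v (not_not.mp h)
        · exact not_not.mp h
      simp only [hcond, Bool.false_eq_true, if_false]
      obtain ⟨h1, h2, h3, h4, h5, h6, h7⟩ := ih q p m hsub hnd
      refine ⟨?_, ?_, h3, ?_, h5, h6, h7⟩
      · intro x
        rw [h1]
        simp only [List.mem_cons]
        constructor
        · tauto
        · rintro (h | rfl | h)
          · exact Or.inl h
          · exact Or.inl hvm
          · exact Or.inr h
      · intro x hx
        rcases h2 x hx with h | h
        · exact Or.inl h
        · exact Or.inr (List.mem_cons_of_mem _ h)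
      · intro x hx hxv hxm
        rcases List.mem_cons.mp hx with rfl | hx'
        · exact absurd hvm hxm
        · exact h4 x hx' hxv hxm


theorem bfsLoop_spec (d : PySem.Dict (Int × Int) Int) (s t : Int)
    (ht : ¬ Reach d.items s t) :
    ∀ (fuel : Nat) (Q : List Int) (vis : PySem.Set Int) (pred : PySem.Dict Int Int)
      (mk : PySem.Set Int),
      (∀ x ∈ mk, x ∈ vis ∨ x ∈ Q) →
      (∀ x ∈ vis, x ∈ mk) →
      (∀ x ∈ Q, x ∈ mk) →
      (∀ x ∈ mk, Reach d.items s x) →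
      (∀ u ∈ vis, ∀ v, EdgeP d.items u v → v ∈ mk) →
      mk.Nodup →
      (∀ x ∈ mk, x ∈ s :: d.items.map (fun e => e.1.2)) →
      Q.length + 2 * (d.items.length + 1) ≤ fuel + 2 * mk.length →
      ((∀ x ∈ mk, x ∈ (bfsLoop (get_adj d) t fuel Q vis pred mk).1) ∧
       (∀ x ∈ (bfsLoop (get_adj d) t fuel Q vis pred mk).1, Reach d.items s x) ∧
       (∀ u ∈ (bfsLoop (get_adj d) t fuel Q vis pred mk).1, ∀ v, EdgeP d.items u v →
          v ∈ (bfsLoop (get_adj d) t fuel Q vis pred mk).1)) := by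
  intro fuel
  induction fuel with
  | zero =>
    intro Q vis pred mk hmkQ hvismem hQmem hsound hclose hnd hsubU harith
    have hmkle : mk.length ≤ d.items.length + 1 := by
      have := (List.Nodup.subperm hnd (fun x hx => hsubU x hx)).length_le
      simpa using this
    have hQ0 : Q = [] := List.eq_nil_of_length_eq_zero (by omega)
    subst hQ0
    simp only [bfsLoop]
    refine ⟨?_, fun x hx => hsound x (hvismem x hx), ?_⟩
    · intro x hx
      rcases hmkQ x hx with h | h
      · exact h
      · exact absurd h List.not_mem_nil
    · intro u' hu' v hv
      rcases hmkQ v (hclose u' hu' v hv) with h | h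
      · exact h
      · exact absurd h List.not_mem_nil
  | succ fuel ih =>
    intro Q vis pred mk hmkQ hvismem hQmem hsound hclose hnd hsubU harith
    cases hQl : Q.getLast? with
    | none =>
      have hQ0 : Q = [] := List.getLast?_eq_none_iff.mp hQl
      subst hQ0
      simp only [bfsLoop]
      refine ⟨?_, fun x hx => hsound x (hvismem x hx), ?_⟩
      · intro x hx
        rcases hmkQ x hx with h | h
        · exact h
        · exact absurd h List.not_mem_nil
      · intro u' hu' v hv
        rcases hmkQ v (hclose u' hu' v hv) with h | h
        · exact h
        · exact absurd h List.not_mem_nil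
    | some u =>
      have hQeq : Q.dropLast ++ [u] = Q := List.dropLast_append_getLast? u hQl
      have huQ : u ∈ Q := by rw [← hQeq]; simp
      have humk : u ∈ mk := hQmem u huQ
      have hur : Reach d.items s u := hsound u humk
      have hut : (u == t) = false := by
        simp only [beq_eq_false_iff_ne, ne_eq]
        intro h; exact ht (h ▸ hur)
      have hQlen : Q.length = Q.dropLast.length + 1 := by
        conv_lhs => rw [← hQeq]
        simp
      have hvis1sub : ∀ x ∈ PySem.Set.add vis u, x ∈ mk := by
        intro x hx
        rcases (PySem.Set.mem_add vis u x).mp hx with h | rfl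
        · exact hvismem x h
        · exact humk
      simp only [bfsLoop, hQl, hut, Bool.false_eq_true, if_false]
      cases hadj : (get_adj d).get? u with
      | none =>
        have hnoedge : ∀ v, ¬ EdgeP d.items u v := by
          intro v hv
          have := (adj_mem d u v).mpr hv
          rw [hadj] at this
          simp at this
        refine ih Q.dropLast (PySem.Set.add vis u) pred mk ?_ hvis1sub ?_ hsound ?_ hnd hsubU ?_
        · intro x hx
          rcases hmkQ x hx with h | h
          · exact Or.inl ((PySem.Set.mem_add vis u x).mpr (Or.inl h))
          · rw [← hQeq] at h
            rcases List.mem_append.mp h with h | h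
            · exact Or.inr h
            · simp only [List.mem_singleton] at h
              exact Or.inl ((PySem.Set.mem_add vis u x).mpr (Or.inr h))
        · exact fun x hx => hQmem x (List.mem_of_mem_dropLast hx)
        · intro u' hu' v hv
          rcases (PySem.Set.mem_add vis u u').mp hu' with h | rfl
          · exact hclose u' h v hv
          · exact absurd hv (hnoedge v)
        · omega
      | some ns =>
        have hnsv : ∀ v, v ∈ ns ↔ EdgeP d.items u v := by
          intro v
          have := adj_mem d u v
          rw [hadj] at this
          simpa using this
        obtain ⟨f1, f2, f3, f4, f5, f6, f7⟩ :=
          push_fold u (PySem.Set.add vis u) ns Q.dropLast pred mk hvis1sub hnd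
        set st := (ns.foldl (fun (acc : List Int × PySem.Dict Int Int × PySem.Set Int) v =>
            if !PySem.Set.contains (PySem.Set.add vis u) v && !PySem.Set.contains acc.2.2 v then
              (acc.1 ++ [v], acc.2.1.insert v u, PySem.Set.add acc.2.2 v)
            else acc) (Q.dropLast, pred, mk)) with hst
        have hA1 : ∀ x ∈ st.2.2, x ∈ PySem.Set.add vis u ∨ x ∈ st.1 := by
          intro x hx
          rcases (f1 x).mp hx with h | h
          · rcases hmkQ x h with h' | h'
            · exact Or.inl ((PySem.Set.mem_add vis u x).mpr (Or.inl h'))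
            · rw [← hQeq] at h'
              rcases List.mem_append.mp h' with h'' | h''
              · exact Or.inr (f3 x h'')
              · simp only [List.mem_singleton] at h''
                exact Or.inl ((PySem.Set.mem_add vis u x).mpr (Or.inr h''))
          · by_cases hv1 : x ∈ PySem.Set.add vis u
            · exact Or.inl hv1
            · by_cases hm : x ∈ mk
              · rcases hmkQ x hm with h' | h'
                · exact absurd ((PySem.Set.mem_add vis u x).mpr (Or.inl h')) hv1
                · rw [← hQeq] at h'
                  rcases List.mem_append.mp h' with h'' | h''
                  · exact Or.inr (f3 x h'')
                  · simp only [List.mem_singleton] at h''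
                    exact absurd ((PySem.Set.mem_add vis u x).mpr (Or.inr h'')) hv1
              · exact Or.inr (f4 x h hv1 hm)
        have hA2 : ∀ x ∈ PySem.Set.add vis u, x ∈ st.2.2 :=
          fun x hx => (f1 x).mpr (Or.inl (hvis1sub x hx))
        have hA3 : ∀ x ∈ st.1, x ∈ st.2.2 := by
          intro x hx
          rcases f2 x hx with h | h
          · exact (f1 x).mpr (Or.inl (hQmem x (List.mem_of_mem_dropLast h)))
          · exact (f1 x).mpr (Or.inr h)
        have hA4 : ∀ x ∈ st.2.2, Reach d.items s x := by
          intro x hx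
          rcases (f1 x).mp hx with h | h
          · exact hsound x h
          · exact Reach.step hur ((hnsv x).mp h)
        have hA5 : ∀ u' ∈ PySem.Set.add vis u, ∀ v, EdgeP d.items u' v → v ∈ st.2.2 := by
          intro u' hu' v hv
          rcases (PySem.Set.mem_add vis u u').mp hu' with h | rfl
          · exact (f1 v).mpr (Or.inl (hclose u' h v hv))
          · exact (f1 v).mpr (Or.inr ((hnsv v).mpr hv))
        have hA6 : ∀ x ∈ st.2.2, x ∈ s :: d.items.map (fun e => e.1.2) := by
          intro x hx
          rcases (f1 x).mp hx with h | h
          · exact hsubU x h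
          · obtain ⟨c, hcmem, -⟩ := (hnsv x).mp h
            exact List.mem_cons_of_mem _ (List.mem_map.mpr ⟨((u, x), c), hcmem, rfl⟩)
        have hA7 : st.1.length + 2 * (d.items.length + 1) ≤ fuel + 2 * st.2.2.length := by
          omega
        obtain ⟨g1, g2, g3⟩ := ih st.1 (PySem.Set.add vis u) st.2.1 st.2.2
          hA1 hA2 hA3 hA4 hA5 f5 hA6 hA7
        exact ⟨fun x hx => g1 x ((f1 x).mpr (Or.inl hx)), g2, g3⟩

theorem A_reach (d : PySem.Dict (Int × Int) Int) (s t : Int)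
    (ht : ¬ Reach d.items s t) :
    ∀ x, x ∈ (bfs d s t).1 ↔ Reach d.items s x := by
  have hsz : d.size = d.items.length := rfl
  have hinit : (PySem.Set.ofList [s] : List Int) = [s] := rfl
  obtain ⟨g1, g2, g3⟩ := bfsLoop_spec d s t ht (2 * d.size + 2) [s] PySem.Set.empty
    PySem.Dict.empty (PySem.Set.ofList [s])
    (by rw [hinit]; intro x hx; exact Or.inr hx)
    (by intro x hx; exact absurd hx List.not_mem_nil)
    (by rw [hinit]; intro x hx; exact hx)
    (by rw [hinit]; intro x hx; simp only [List.mem_singleton] at hx; subst hx; exact Reach.base)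
    (by intro u hu; exact absurd hu List.not_mem_nil)
    (by rw [hinit]; simp)
    (by rw [hinit]; simp)
    (by rw [hinit]; simp only [List.length_singleton]; omega)
  intro x
  constructor
  · exact fun hx => g2 x hx
  · intro hr
    induction hr with
    | base => exact g1 s (by rw [hinit]; simp)
    | step h he ihh => exact g3 _ ihh _ he

theorem growLoop_spec (d : PySem.Dict (Int × Int) Int) (s : Int) :
    ∀ (fuel : Nat) (vis : PySem.Set Int),
      vis.Nodup →
      (∀ x ∈ vis, x ∈ s :: d.items.map (fun e => e.1.2)) →
      (∀ x ∈ vis, Reach d.items s x) →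
      d.items.length + 2 ≤ fuel + vis.length →
      ((∀ x ∈ vis, x ∈ growLoop d fuel vis) ∧
       (∀ x ∈ growLoop d fuel vis, Reach d.items s x) ∧
       (∀ u ∈ growLoop d fuel vis, ∀ v, EdgeP d.items u v → v ∈ growLoop d fuel vis)) := by
  intro fuel
  induction fuel with
  | zero =>
    intro vis hnd hsubU hsound harith
    exfalso
    have hle : vis.length ≤ (s :: d.items.map (fun e => e.1.2)).length :=
      (List.Nodup.subperm hnd (fun x hx => hsubU x hx)).length_le
    simp only [List.length_cons, List.length_map] at hle
    omega
  | succ fuel ih =>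
    intro vis hnd hsubU hsound harith
    rw [growLoop]
    set nw : PySem.Set Int := PySem.Set.ofList
      ((d.items.filter (fun e =>
          e.2 != 0 && PySem.Set.contains vis e.1.1 && !PySem.Set.contains vis e.1.2)).map
        (fun e => e.1.2)) with hnw
    have hnwmem : ∀ x, x ∈ nw ↔ ∃ e ∈ d.items,
        (e.2 ≠ 0 ∧ e.1.1 ∈ vis ∧ e.1.2 ∉ vis) ∧ e.1.2 = x := by
      intro x
      rw [hnw, PySem.Set.mem_ofList]
      simp [List.mem_filter, PySem.Set.contains]
      tauto
    by_cases hempty : nw = ([] : List Int)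
    · rw [if_pos hempty]
      refine ⟨fun x hx => hx, hsound, ?_⟩
      intro u hu v ⟨c, hcmem, hc⟩
      by_contra hv
      have : v ∈ nw := by
        rw [hnwmem]
        exact ⟨((u, v), c), hcmem, ⟨hc, hu, hv⟩, rfl⟩
      rw [hempty] at this
      exact absurd this (List.not_mem_nil)
    · rw [if_neg hempty]
      have hvis' : ∀ x, x ∈ PySem.Set.union vis nw ↔ x ∈ vis ∨ x ∈ nw :=
        fun x => PySem.Set.mem_union vis nw x
      have hnd' : (PySem.Set.union vis nw).Nodup := PySem.Set.nodup_union vis nw hnd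
      have hsubU' : ∀ x ∈ PySem.Set.union vis nw, x ∈ s :: d.items.map (fun e => e.1.2) := by
        intro x hx
        rcases (hvis' x).mp hx with h | h
        · exact hsubU x h
        · rcases (hnwmem x).mp h with ⟨e, he, _, hx'⟩
          exact List.mem_cons_of_mem _ (List.mem_map.mpr ⟨e, he, hx'⟩)
      have hsound' : ∀ x ∈ PySem.Set.union vis nw, Reach d.items s x := by
        intro x hx
        rcases (hvis' x).mp hx with h | h
        · exact hsound x h
        · rcases (hnwmem x).mp h with ⟨e, he, ⟨hc, hu, _⟩, hx'⟩
          exact Reach.step (hsound _ hu) ⟨e.2, by rcases e with ⟨⟨a, b⟩, c⟩; simp_all, hc⟩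
      have hlen : vis.length + 1 ≤ (PySem.Set.union vis nw).length := by
        obtain ⟨y, hy⟩ := List.exists_mem_of_ne_nil nw hempty
        have hynv : y ∉ vis := by
          rcases (hnwmem y).mp hy with ⟨e, _, ⟨_, _, h⟩, hx'⟩
          rwa [hx'] at h
        have hsubyc : (y :: vis) ⊆ PySem.Set.union vis nw := by
          intro x hx
          rcases List.mem_cons.mp hx with rfl | hx'
          · exact (hvis' x).mpr (Or.inr hy)
          · exact (hvis' x).mpr (Or.inl hx')
        have : (y :: vis).Nodup := List.nodup_cons.mpr ⟨hynv, hnd⟩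
        simpa using (List.Nodup.subperm this hsubyc).length_le
      obtain ⟨g1, g2, g3⟩ := ih (PySem.Set.union vis nw) hnd' hsubU' hsound' (by omega)
      exact ⟨fun x hx => g1 x ((hvis' x).mpr (Or.inl hx)), g2, g3⟩


theorem B_reach (d : PySem.Dict (Int × Int) Int) (s : Int) :
    ∀ x, x ∈ reach_set d s ↔ Reach d.items s x := by
  have hinit : (PySem.Set.ofList [s] : List Int) = [s] := rfl
  obtain ⟨g1, g2, g3⟩ := growLoop_spec d s (d.size + 1) (PySem.Set.ofList [s])
    (by rw [hinit]; simp)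
    (by rw [hinit]; intro x hx; simp at hx; simp [hx])
    (by rw [hinit]; intro x hx; simp at hx; subst hx; exact Reach.base)
    (by rw [hinit]; simp [PySem.Dict.size])
  intro x
  constructor
  · exact g2 x
  · intro hr
    induction hr with
    | base => exact g1 s (by rw [hinit]; simp)
    | step h he ihh => exact g3 _ ihh _ he


-- ===== VERDICT (by name: the statement is the Claim_ definition above) =====
theorem find_min_cut_spec : Claim_equal_find_min_cut := by
  intro graph s t _hdom hpre
  unfold Spec_find_min_cut find_min_cut find_min_cut_alt
  have ht : ¬ Reach (toDict graph).items s t := by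
    intro hr
    unfold Pre_find_min_cut at hpre
    exact hpre (cutReach_complete graph s t hr)
  apply List.filter_congr
  intro p _hp
  have hx : ∀ x, PySem.Set.contains (bfs (toDict graph) s t).1 x
      = PySem.Set.contains (reach_set (toDict graph) s) x := by
    intro x
    rw [Bool.eq_iff_iff, set_contains_iff, set_contains_iff, A_reach _ _ _ ht, B_reach]
  rw [hx, hx]
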